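-- pv_equiv track=rewrite | github.com/Mistic1989/projects | Python homework/EX/ex03_idcode/idcode.py | is_valid_day_number
-- ===== SOURCE A (Python) =====
-- def is_leap_year(year_number: int) -> bool:
--     """Check if given value is leap year or not."""
--     if year_number % 400 == 0 or (year_number % 4 == 0 and year_number % 100 != 0):
--         return True
--     return False
--
-- def get_full_year(gender_number: int, year_number: int) -> int:
--     """Define the 4-digit year when given person was born."""
--     full_year = ""
--     if gender_number in range(1, 3):
--         full_year += "18"
--     elif gender_number in range(3, 5):
--         full_year += "19"
--     elif gender_number in range(5, 7):
--         full_year += "20"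
--
--     if year_number in range(0, 10):
--         return int(full_year + "0" + str(year_number))
--     else:
--         return int(full_year + str(year_number))
--
-- def is_valid_day_number(gender_number: int, year_number: int, month_number: int, day_number: int) -> bool:
--     """Check if given value is correct for day number in ID code."""
--     month_length_is_31 = [1, 3, 5, 7, 8, 10, 12]
--     month_length_is_30 = [4, 6, 9, 11]
--
--     if month_number in month_length_is_31 and day_number in range(1, 32):
--         for month in month_length_is_31:
--             if month == month_number:
--                 return True
--     if month_number in month_length_is_30 and day_number in range(1, 31):
--         for month in month_length_is_30:
--             if month == month_number:
--                 return True
--     elif is_leap_year(get_full_year(gender_number, year_number)) and month_number == 2 and day_number in range(1, 30):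
--         return True
--     elif month_number == 2 and day_number in range(1, 29):
--         return True
--     return False
-- ===== SOURCE B (Python) =====
-- def is_leap_year(year_number: int) -> bool:
--     """Check if given value is leap year or not."""
--     if year_number % 400 == 0 or (year_number % 4 == 0 and year_number % 100 != 0):
--         return True
--     return False
--
-- def get_full_year(gender_number: int, year_number: int) -> int:
--     """Define the 4-digit year when given person was born."""
--     full_year = ""
--     if gender_number in range(1, 3):
--         full_year += "18"
--     elif gender_number in range(3, 5):
--         full_year += "19"
--     elif gender_number in range(5, 7):
--         full_year += "20"
--
--     if year_number in range(0, 10):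
--         return int(full_year + "0" + str(year_number))
--     else:
--         return int(full_year + str(year_number))
--
-- def is_valid_day_number(gender_number: int, year_number: int, month_number: int, day_number: int) -> bool:
--     """Check if given value is correct for day number in ID code.
--
--     Uses the closed-form month-length formula 28 + (m + m//8) % 2 + 2 % m + 2*(m == 1)
--     instead of membership tests against month lists; February gains a day in leap years.
--     """
--     if not 1 <= month_number <= 12:
--         return False
--     m = month_number
--     days = 28 + (m + m // 8) % 2 + 2 % m + 2 * (m == 1)
--     if m == 2 and is_leap_year(get_full_year(gender_number, year_number)):
--         days = 29
--     return 1 <= day_number <= days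
-- ===== Notes on version B (the rewrite author's own statement) =====
-- stated objective: alternative
-- what changed: B replaces A's list-membership branches and confirming loops by the arithmetic closed-form month length 28 + (m + m//8) % 2 + 2 % m + 2*(m == 1) (29 for leap February), followed by a single bound check on the day.
import Mathlib
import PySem

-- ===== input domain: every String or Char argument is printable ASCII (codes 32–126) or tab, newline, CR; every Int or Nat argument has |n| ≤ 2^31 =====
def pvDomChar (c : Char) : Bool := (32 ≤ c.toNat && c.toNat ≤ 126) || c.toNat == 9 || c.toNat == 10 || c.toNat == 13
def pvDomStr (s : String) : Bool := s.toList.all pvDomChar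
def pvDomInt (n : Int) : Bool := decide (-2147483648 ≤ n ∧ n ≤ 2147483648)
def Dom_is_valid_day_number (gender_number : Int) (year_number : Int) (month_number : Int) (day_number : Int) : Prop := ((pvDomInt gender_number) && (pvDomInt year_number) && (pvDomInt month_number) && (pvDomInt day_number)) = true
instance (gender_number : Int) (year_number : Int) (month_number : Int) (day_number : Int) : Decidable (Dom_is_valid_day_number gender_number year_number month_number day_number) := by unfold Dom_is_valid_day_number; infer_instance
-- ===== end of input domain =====

-- B computes the month length by the arithmetic closed form 28 + (m + m//8) % 2 + 2 % m + 2*(m==1)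
-- (29 for leap February) and does one bound check, instead of A's list-membership branches with
-- confirming loops (objective: alternative).

-- ===== PORT A =====
-- shared helpers, transliterated from the module (Source B contains the identical helpers)
def is_leap_year (year_number : Int) : Bool :=
  if PySem.Int.mod year_number 400 = 0 ∨ (PySem.Int.mod year_number 4 = 0 ∧ PySem.Int.mod year_number 100 ≠ 0) then
    true
  else
    false

-- int(...) raises ValueError in Python when the string is not a valid int (e.g. "18-5");
-- those inputs are excluded by Pre_, so the .getD 0 default is never relied upon.
def get_full_year (gender_number : Int) (year_number : Int) : Int :=
  let full_year : String :=
    if 1 ≤ gender_number ∧ gender_number < 3 then "" ++ "18"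
    else if 3 ≤ gender_number ∧ gender_number < 5 then "" ++ "19"
    else if 5 ≤ gender_number ∧ gender_number < 7 then "" ++ "20"
    else ""
  if 0 ≤ year_number ∧ year_number < 10 then
    (PySem.Int.ofStr? (full_year ++ "0" ++ PySem.Int.toStr year_number)).getD 0
  else
    (PySem.Int.ofStr? (full_year ++ PySem.Int.toStr year_number)).getD 0

def is_valid_day_number (gender_number : Int) (year_number : Int) (month_number : Int) (day_number : Int) : Bool :=
  let month_length_is_31 : List Int := [1, 3, 5, 7, 8, 10, 12]
  let month_length_is_30 : List Int := [4, 6, 9, 11]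
  -- code after the first if-statement (reached when its body's loop does not return)
  let rest : Bool :=
    if month_length_is_30.contains month_number && decide (1 ≤ day_number ∧ day_number < 31) then
      -- for month in month_length_is_30: if month == month_number: return True — then fall to 'return False'
      (if month_length_is_30.any (fun month => month == month_number) then true else false)
    else if is_leap_year (get_full_year gender_number year_number) && month_number == 2
            && decide (1 ≤ day_number ∧ day_number < 30) then
      true
    else if month_number == 2 && decide (1 ≤ day_number ∧ day_number < 29) then
      true
    else
      false
  if month_length_is_31.contains month_number && decide (1 ≤ day_number ∧ day_number < 32) then
    -- for month in month_length_is_31: if month == month_number: return True — else fall through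
    (if month_length_is_31.any (fun month => month == month_number) then true else rest)
  else
    rest

-- ===== PORT B =====
def is_valid_day_number_alt (gender_number : Int) (year_number : Int) (month_number : Int) (day_number : Int) : Bool :=
  if ¬ (1 ≤ month_number ∧ month_number ≤ 12) then false
  else
    let m := month_number
    let days : Int :=
      28 + PySem.Int.mod (m + PySem.Int.floordiv m 8) 2 + PySem.Int.mod 2 m
        + 2 * (if m == 1 then 1 else 0)
    let days : Int :=
      if m == 2 && is_leap_year (get_full_year gender_number year_number) then 29 else days
    decide (1 ≤ day_number ∧ day_number ≤ days)

-- ===== PRECONDITION & SPEC =====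
-- Pre_ excludes exactly the inputs on which A raises ValueError: gender 1..6 with a negative
-- year when neither of the first two month/day branches returns, so int("18-…") is attempted.
def Pre_is_valid_day_number (gender_number : Int) (year_number : Int) (month_number : Int) (day_number : Int) : Prop :=
  ¬ (1 ≤ gender_number ∧ gender_number ≤ 6 ∧ year_number < 0
     ∧ ¬ (month_number ∈ ([1, 3, 5, 7, 8, 10, 12] : List Int) ∧ 1 ≤ day_number ∧ day_number ≤ 31)
     ∧ ¬ (month_number ∈ ([4, 6, 9, 11] : List Int) ∧ 1 ≤ day_number ∧ day_number ≤ 30))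
instance (gender_number : Int) (year_number : Int) (month_number : Int) (day_number : Int) : Decidable (Pre_is_valid_day_number gender_number year_number month_number day_number) := by unfold Pre_is_valid_day_number; infer_instance

def pvWitness_is_valid_day_number : Int × Int × Int × Int := (3, 96, 2, 29)

def Spec_is_valid_day_number (gender_number : Int) (year_number : Int) (month_number : Int) (day_number : Int) (out : Bool) : Prop := out = is_valid_day_number_alt gender_number year_number month_number day_number
instance (gender_number : Int) (year_number : Int) (month_number : Int) (day_number : Int) (out : Bool) : Decidable (Spec_is_valid_day_number gender_number year_number month_number day_number out) := by unfold Spec_is_valid_day_number; infer_instance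

-- ===== CLAIM (what is proved, stated in full; the proofs are below) =====
def Claim_equal_is_valid_day_number : Prop := ∀ (gender_number : Int) (year_number : Int) (month_number : Int) (day_number : Int), Dom_is_valid_day_number gender_number year_number month_number day_number → Pre_is_valid_day_number gender_number year_number month_number day_number → Spec_is_valid_day_number gender_number year_number month_number day_number (is_valid_day_number gender_number year_number month_number day_number)

-- ===== LEMMAS AND PROOFS =====

-- For month in 1..12 the closed form 28 + (m + m//8) % 2 + 2 % m + 2*[m=1] equals the
-- month length A encodes through its lists (28 for February before the leap adjustment).
lemma days_formula (m : Int) (h1 : 1 ≤ m) (h2 : m ≤ 12) :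
    28 + PySem.Int.mod (m + PySem.Int.floordiv m 8) 2 + PySem.Int.mod 2 m
      + 2 * (if m == 1 then 1 else 0)
    = if m ∈ ([1, 3, 5, 7, 8, 10, 12] : List Int) then 31
      else if m ∈ ([4, 6, 9, 11] : List Int) then 30 else 28 := by
  interval_cases m <;> decide

-- ===== VERDICT (by name: the statement is the Claim_ definition above) =====
theorem is_valid_day_number_spec : Claim_equal_is_valid_day_number := by
  intro g y m d _ _
  unfold Spec_is_valid_day_number is_valid_day_number is_valid_day_number_alt
  by_cases hm : 1 ≤ m ∧ m ≤ 12
  · obtain ⟨h1, h2⟩ := hm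
    rw [if_neg (not_not_intro ⟨h1, h2⟩)]
    simp only [days_formula m h1 h2]
    by_cases c31 : m ∈ ([1, 3, 5, 7, 8, 10, 12] : List Int) <;>
    by_cases c30 : m ∈ ([4, 6, 9, 11] : List Int) <;>
    by_cases hm2 : m = 2 <;>
    cases hL : is_leap_year (get_full_year g y) <;>
      simp_all [List.contains_eq_mem, beq_iff_eq] <;> (try omega) <;> (rw [Bool.eq_iff_iff]; simp only [Bool.and_eq_true, Bool.or_eq_true, decide_eq_true_eq]; omega)
  · rw [if_pos hm]
    simp [List.contains_eq_mem]
    split_ifs <;> simp_all <;> omega
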